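-- pv_equiv track=rewrite | github.com/KaztoRay/Ordinal-Browser | agent/analyzers/content_security.py | _guess_resource_type
-- ===== SOURCE A (Python) =====
-- def _guess_resource_type(path: str) -> str:
--     """URL 경로에서 리소스 유형 추정"""
--     ext_map = {
--         ".js": "script",
--         ".mjs": "script",
--         ".css": "stylesheet",
--         ".jpg": "image", ".jpeg": "image", ".png": "image",
--         ".gif": "image", ".svg": "image", ".webp": "image",
--         ".ico": "image", ".bmp": "image",
--         ".woff": "font", ".woff2": "font", ".ttf": "font",
--         ".eot": "font", ".otf": "font",
--         ".mp3": "audio", ".ogg": "audio", ".wav": "audio",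
--         ".mp4": "video", ".webm": "video", ".avi": "video",
--         ".swf": "object", ".pdf": "object",
--     }
--
--     for ext, rtype in ext_map.items():
--         if path.endswith(ext):
--             return rtype
--
--     return "unknown"
-- ===== SOURCE B (Python) =====
-- _BY_TYPE = [
--     ("script", ["js", "mjs"]),
--     ("stylesheet", ["css"]),
--     ("image", ["jpg", "jpeg", "png", "gif", "svg", "webp", "ico", "bmp"]),
--     ("font", ["woff", "woff2", "ttf", "eot", "otf"]),
--     ("audio", ["mp3", "ogg", "wav"]),
--     ("video", ["mp4", "webm", "avi"]),
--     ("object", ["swf", "pdf"]),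
-- ]
--
--
-- def _guess_resource_type(path: str) -> str:
--     """URL 경로에서 리소스 유형 추정"""
--     _head, dot, ext = path.rpartition(".")
--     if dot:
--         for rtype, exts in _BY_TYPE:
--             if ext in exts:
--                 return rtype
--     return "unknown"
-- ===== Notes on version B (the rewrite author's own statement) =====
-- stated objective: alternative
-- what changed: Instead of testing path.endswith against each of 23 dotted keys, B extracts the part after the last dot once with rpartition and scans an inverted table grouped by resource type (type -> bare extensions); correct because every key is a single-dot suffix and keys are distinct.
import Mathlib
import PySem

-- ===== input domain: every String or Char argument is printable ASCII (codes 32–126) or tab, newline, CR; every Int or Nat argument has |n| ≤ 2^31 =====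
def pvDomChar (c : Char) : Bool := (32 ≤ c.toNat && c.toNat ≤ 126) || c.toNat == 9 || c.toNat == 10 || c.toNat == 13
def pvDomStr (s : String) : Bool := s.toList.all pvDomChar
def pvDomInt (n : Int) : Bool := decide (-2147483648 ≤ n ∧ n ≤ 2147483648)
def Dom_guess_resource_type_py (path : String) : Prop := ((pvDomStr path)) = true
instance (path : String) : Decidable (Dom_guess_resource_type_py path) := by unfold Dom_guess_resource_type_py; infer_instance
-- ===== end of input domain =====

-- B replaces A's 23 endswith tests with one last-dot split and a scan of an inverted
-- table grouped by resource type (alternative decomposition; same results).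

-- ===== PORT A =====
-- A's ext_map literal, in insertion order (keys distinct, so items = this list).
def pvExtPairsA : List (String × String) :=
  [(".js", "script"), (".mjs", "script"), (".css", "stylesheet"),
   (".jpg", "image"), (".jpeg", "image"), (".png", "image"),
   (".gif", "image"), (".svg", "image"), (".webp", "image"),
   (".ico", "image"), (".bmp", "image"),
   (".woff", "font"), (".woff2", "font"), (".ttf", "font"),
   (".eot", "font"), (".otf", "font"),
   (".mp3", "audio"), (".ogg", "audio"), (".wav", "audio"),
   (".mp4", "video"), (".webm", "video"), (".avi", "video"),
   (".swf", "object"), (".pdf", "object")]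

-- A's loop: first rtype whose ext is a suffix of path, else "unknown".
def pvLoopA (path : String) : List (String × String) → String
  | [] => "unknown"
  | (ext, rtype) :: rest =>
      if PySem.Str.endswith path ext then rtype else pvLoopA path rest

def guess_resource_type_py (path : String) : String :=
  pvLoopA path pvExtPairsA

-- ===== PORT B =====
-- B's inverted table: resource type -> bare extensions (no dots), grouped.
def pvByType : List (String × List String) :=
  [("script", ["js", "mjs"]),
   ("stylesheet", ["css"]),
   ("image", ["jpg", "jpeg", "png", "gif", "svg", "webp", "ico", "bmp"]),
   ("font", ["woff", "woff2", "ttf", "eot", "otf"]),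
   ("audio", ["mp3", "ogg", "wav"]),
   ("video", ["mp4", "webm", "avi"]),
   ("object", ["swf", "pdf"])]

-- hand port of str.rpartition(".") keeping only the tail: chars after the LAST dot,
-- none when the separator does not occur (exact: recursion takes the rightmost match).
def pvAfterLastDot : List Char → Option (List Char)
  | [] => none
  | c :: cs =>
      match pvAfterLastDot cs with
      | some t => some t
      | none => if c = '.' then some cs else none

-- B's loop over the grouped table: first type whose extension list contains ext.
def pvScanTypes (e : String) : List (String × List String) → String
  | [] => "unknown"
  | (rtype, exts) :: rest => if exts.contains e then rtype else pvScanTypes e rest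

def guess_resource_type_py_alt (path : String) : String :=
  match pvAfterLastDot path.toList with
  | none => "unknown"
  | some t => pvScanTypes (String.ofList t) pvByType

-- ===== PRECONDITION & SPEC =====
def Spec_guess_resource_type_py (path : String) (out : String) : Prop := out = guess_resource_type_py_alt path
instance (path : String) (out : String) : Decidable (Spec_guess_resource_type_py path out) := by unfold Spec_guess_resource_type_py; infer_instance

-- ===== CLAIM (what is proved, stated in full; the proofs are below) =====
def Claim_equal_guess_resource_type_py : Prop := ∀ (path : String), Dom_guess_resource_type_py path → Spec_guess_resource_type_py path (guess_resource_type_py path)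

-- ===== LEMMAS AND PROOFS =====

theorem pvAfterLastDot_eq_none_of_not_mem (cs : List Char) (h : '.' ∉ cs) :
    pvAfterLastDot cs = none := by
  induction cs with
  | nil => rfl
  | cons c cs ih =>
      simp only [List.mem_cons, not_or] at h
      simp [pvAfterLastDot, ih h.2, Ne.symm h.1]

theorem pv_not_mem_of_afterLastDot_eq_none (cs : List Char) (h : pvAfterLastDot cs = none) :
    '.' ∉ cs := by
  induction cs with
  | nil => simp
  | cons c cs ih =>
      simp only [pvAfterLastDot] at h
      cases hrec : pvAfterLastDot cs with
      | some u => rw [hrec] at h; simp at h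
      | none =>
          rw [hrec] at h
          by_cases hc : c = '.'
          · simp [hc] at h
          · simp [Ne.symm hc, ih hrec]

theorem pvAfterLastDot_append (pre t : List Char) (h : '.' ∉ t) :
    pvAfterLastDot (pre ++ '.' :: t) = some t := by
  induction pre with
  | nil => simp [pvAfterLastDot, pvAfterLastDot_eq_none_of_not_mem t h]
  | cons c pre ih => simp [pvAfterLastDot, ih]

theorem pvAfterLastDot_some (cs t : List Char) (h : pvAfterLastDot cs = some t) :
    (∃ pre, cs = pre ++ '.' :: t) ∧ '.' ∉ t := by
  induction cs with
  | nil => simp [pvAfterLastDot] at h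
  | cons c cs ih =>
      simp only [pvAfterLastDot] at h
      cases hrec : pvAfterLastDot cs with
      | some u =>
          rw [hrec] at h
          simp only [Option.some.injEq] at h
          subst h
          obtain ⟨⟨pre, hp⟩, hn⟩ := ih hrec
          exact ⟨⟨c :: pre, by simp [hp]⟩, hn⟩
      | none =>
          rw [hrec] at h
          by_cases hc : c = '.'
          · subst hc
            rw [if_pos rfl] at h
            obtain rfl := Option.some.inj h
            exact ⟨⟨[], by simp⟩, pv_not_mem_of_afterLastDot_eq_none _ hrec⟩
          · simp [hc] at h

-- key characterisation: for a key '.'::u with no further dot,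
-- endswith ⇔ the tail after the last dot is exactly u
theorem pv_endswith_iff (path : String) (k : String) (u : List Char)
    (hk : k.toList = '.' :: u) (hu : '.' ∉ u) :
    PySem.Str.endswith path k = true ↔ pvAfterLastDot path.toList = some u := by
  rw [PySem.Str.endswith_eq, PySem.Chars.endswith_iff, hk]
  constructor
  · rintro ⟨pre, hp⟩
    rw [← hp]
    exact pvAfterLastDot_append pre u hu
  · intro h
    obtain ⟨⟨pre, hp⟩, _⟩ := pvAfterLastDot_some _ _ h
    exact ⟨pre, hp.symm⟩

theorem pv_toList_ofList (l : List Char) : (String.ofList l).toList = l := by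
  simp

-- first value in an association list whose key equals e, else "unknown"
-- (characterises A's loop once endswith is reduced to last-dot equality; proof-side only)
def pvFirstVal (e : String) : List (String × String) → String
  | [] => "unknown"
  | (k, v) :: rest => if k = e then v else pvFirstVal e rest

-- prepend a dot to a bare extension
def pvDotted (e : String) : String := String.ofList ('.' :: e.toList)

theorem pvDotted_inj (a b : String) (h : pvDotted a = pvDotted b) : a = b := by
  have := congrArg String.toList h
  simp only [pvDotted, pv_toList_ofList, List.cons.injEq] at this
  exact String.toList_inj.mp this.2

-- A's loop equals: take the tail after the last dot, then look up the dotted tail.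
theorem pv_loopA_eq (path : String) (ps : List (String × String))
    (h : ∀ p ∈ ps, p.1.toList.head? = some '.' ∧ '.' ∉ p.1.toList.tail) :
    pvLoopA path ps =
      match pvAfterLastDot path.toList with
      | none => "unknown"
      | some t => pvFirstVal (String.ofList ('.' :: t)) ps := by
  induction ps with
  | nil => cases hd : pvAfterLastDot path.toList <;> simp [pvLoopA, pvFirstVal]
  | cons p rest ih =>
      obtain ⟨k, v⟩ := p
      obtain ⟨hhead, htail⟩ := h (k, v) (by simp)
      obtain ⟨u, hk, hu⟩ : ∃ u, k.toList = '.' :: u ∧ '.' ∉ u := by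
        cases hkl : k.toList with
        | nil => rw [hkl] at hhead; simp at hhead
        | cons a l =>
            rw [hkl] at hhead htail
            simp only [List.head?_cons, Option.some.injEq] at hhead
            exact ⟨l, by rw [hhead], htail⟩
      have hrest := ih (fun q hq => h q (by simp [hq]))
      have hkeq : k = String.ofList ('.' :: u) := by
        apply String.toList_inj.mp
        rw [hk, pv_toList_ofList]
      by_cases he : PySem.Str.endswith path k = true
      · have hd := (pv_endswith_iff path k u hk hu).mp he
        rw [PySem.Str.endswith_eq] at he
        rw [hd]
        simp [pvLoopA, he, pvFirstVal, ← hkeq]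
      · have hd : pvAfterLastDot path.toList ≠ some u :=
          fun hc => he ((pv_endswith_iff path k u hk hu).mpr hc)
        rw [Bool.not_eq_true, PySem.Str.endswith_eq] at he
        have hL : pvLoopA path ((k, v) :: rest) = pvLoopA path rest := by
          simp [pvLoopA, he]
        rw [hL, hrest]
        cases hd2 : pvAfterLastDot path.toList with
        | none => rfl
        | some t =>
            have htu : t ≠ u := fun h' => hd (by rw [hd2, h'])
            have hne : k ≠ String.ofList ('.' :: t) := by
              intro hc
              apply htu
              have := congrArg String.toList hc
              rw [hk, pv_toList_ofList] at this
              simpa using this.symm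
            simp [pvFirstVal, hne]

-- the grouped scan equals first-value lookup in the flattened dotted association list
theorem pv_scan_eq_flat (e : String) (L : List (String × List String)) :
    pvFirstVal (pvDotted e) (L.flatMap (fun p => p.2.map (fun x => (pvDotted x, p.1))))
      = pvScanTypes e L := by
  induction L with
  | nil => rfl
  | cons p rest ih =>
      obtain ⟨rt, exts⟩ := p
      simp only [List.flatMap_cons]
      induction exts with
      | nil => simpa [pvScanTypes] using ih
      | cons x xs ihx =>
          by_cases hx : x = e
          · subst hx
            simp only [List.map_cons, List.cons_append, pvFirstVal]
            simp [pvScanTypes]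
          · have hdx : pvDotted x ≠ pvDotted e := fun hc => hx (pvDotted_inj _ _ hc)
            simp only [List.map_cons, List.cons_append, pvFirstVal, if_neg hdx]
            rw [show (List.map (fun x => (pvDotted x, rt)) xs ++ rest.flatMap (fun p => p.2.map (fun x => (pvDotted x, p.1)))) = (xs.map (fun x => (pvDotted x, rt)) ++ rest.flatMap (fun p => p.2.map (fun x => (pvDotted x, p.1)))) from rfl]
            rw [ihx]
            simp [pvScanTypes, Ne.symm hx]

-- A's flat dotted list is exactly B's grouped table flattened
theorem pv_pairs_eq_flat :
    pvExtPairsA = pvByType.flatMap (fun p => p.2.map (fun x => (pvDotted x, p.1))) := by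
  decide

-- ===== VERDICT (by name: the statement is the Claim_ definition above) =====
theorem guess_resource_type_py_spec : Claim_equal_guess_resource_type_py := by
  intro path _
  unfold Spec_guess_resource_type_py guess_resource_type_py guess_resource_type_py_alt
  rw [pv_loopA_eq path pvExtPairsA (by decide)]
  cases hd : pvAfterLastDot path.toList with
  | none => rfl
  | some t =>
      have : String.ofList ('.' :: t) = pvDotted (String.ofList t) := by
        simp [pvDotted]
      simp only [this, pv_pairs_eq_flat]
      exact pv_scan_eq_flat (String.ofList t) pvByType
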